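-- pv_equiv track=rewrite | github.com/Yisuescopeta/MotorVideojuegosIA | engine/tilemap/collision_builder.py | _merge_cells_to_rectangles
-- ===== SOURCE A (Python) =====
-- def _merge_cells_to_rectangles(solid_cells: set[tuple[int, int]]) -> list[dict[str, int]]:
--     remaining = set(solid_cells)
--     rectangles: list[dict[str, int]] = []
--     while remaining:
--         start_x, start_y = min(remaining, key=lambda item: (item[1], item[0]))
--         width_cells = 1
--         while (start_x + width_cells, start_y) in remaining:
--             width_cells += 1
--         height_cells = 1
--         growing = True
--         while growing:
--             next_row = start_y + height_cells
--             growing = all((start_x + offset, next_row) in remaining for offset in range(width_cells))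
--             if growing:
--                 height_cells += 1
--         for offset_y in range(height_cells):
--             for offset_x in range(width_cells):
--                 remaining.discard((start_x + offset_x, start_y + offset_y))
--         rectangles.append(
--             {
--                 "x": start_x,
--                 "y": start_y,
--                 "width_cells": width_cells,
--                 "height_cells": height_cells,
--             }
--         )
--     return rectangles
-- ===== SOURCE B (Python) =====
-- def _merge_cells_to_rectangles(solid_cells):
--     # Sort the cells once by (row, column); a pointer sweep over that order consumes
--     # each rectangle's first row as a run of consecutive list entries, and "already
--     # merged" is decided by containment in the emitted rectangles instead of
--     # maintaining a removed-cells set.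
--     cells = set(solid_cells)
--     order = sorted(cells, key=lambda c: (c[1], c[0]))
--     boxes = []  # (x, y, width, height) of emitted rectangles
--
--     def covered(px, py):
--         return any(bx <= px < bx + bw and by <= py < by + bh
--                    for (bx, by, bw, bh) in boxes)
--
--     i = 0
--     n = len(order)
--     while i < n:
--         x, y = order[i]
--         if covered(x, y):
--             i += 1
--             continue
--         w = 1
--         j = i + 1
--         while j < n and order[j] == (x + w, y) and not covered(x + w, y):
--             w += 1
--             j += 1
--         h = 1
--         while all((x + o, y + h) in cells and not covered(x + o, y + h)
--                   for o in range(w)):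
--             h += 1
--         boxes.append((x, y, w, h))
--         i = j
--     return [{"x": bx, "y": by, "width_cells": bw, "height_cells": bh}
--             for (bx, by, bw, bh) in boxes]
-- ===== Notes on version B (the rewrite author's own statement) =====
-- stated objective: alternative
-- what changed: B sorts the cells once by (row, column) and sweeps them with a pointer: each rectangle's first row is consumed as a run of consecutive entries of the sorted list (no repeated min() over a shrinking set), and 'already merged' is decided by point-in-rectangle containment against the emitted rectangle list instead of mutating a removed-cells set.
import Mathlib
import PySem

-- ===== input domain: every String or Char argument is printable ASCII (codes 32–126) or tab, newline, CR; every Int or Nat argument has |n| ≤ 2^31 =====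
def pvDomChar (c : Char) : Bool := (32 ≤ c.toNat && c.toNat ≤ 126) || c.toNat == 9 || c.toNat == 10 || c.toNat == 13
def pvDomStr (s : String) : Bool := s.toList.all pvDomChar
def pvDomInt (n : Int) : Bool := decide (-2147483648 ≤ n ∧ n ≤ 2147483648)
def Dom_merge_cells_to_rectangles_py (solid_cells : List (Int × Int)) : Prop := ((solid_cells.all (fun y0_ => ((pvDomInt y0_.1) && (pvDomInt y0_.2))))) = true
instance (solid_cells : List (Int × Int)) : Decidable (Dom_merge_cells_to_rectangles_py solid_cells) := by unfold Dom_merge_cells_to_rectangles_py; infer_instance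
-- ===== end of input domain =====

-- B sorts the cells once by (row, column) and sweeps them with a pointer, each
-- rectangle's first row being consumed as a run of consecutive sorted entries;
-- "already merged" is decided by containment in the emitted rectangles instead of
-- mutating a removed-cells set (alternative algorithm, no speed claim).

-- ===== PORT A =====
-- while (start_x + width_cells, start_y) in remaining: width_cells += 1
-- (fuel is a totality guard only; the run length is bounded by the set's size)
def pvWidthA (fuel : Nat) (remaining : PySem.Set (Int × Int)) (x y w : Int) : Int :=
  match fuel with
  | 0 => w
  | f + 1 => if (x + w, y) ∈ remaining then pvWidthA f remaining x y (w + 1) else w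

-- while growing: growing = all((start_x+o, start_y+h) in remaining for o in range(width)); if growing: h += 1
def pvHeightA (fuel : Nat) (remaining : PySem.Set (Int × Int)) (x y w h : Int) : Int :=
  match fuel with
  | 0 => h
  | f + 1 =>
    let next_row := y + h
    let growing := (PySem.List.pyRange 0 w).all (fun o => decide ((x + o, next_row) ∈ remaining))
    if growing then pvHeightA f remaining x y w (h + 1) else h

-- for offset_y in range(height): for offset_x in range(width): remaining.discard(...)
def pvCarveA (remaining : PySem.Set (Int × Int)) (x y w h : Int) : PySem.Set (Int × Int) :=
  (PySem.List.pyRange 0 h).foldl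
    (fun s oy => (PySem.List.pyRange 0 w).foldl
      (fun s ox => PySem.Set.discard s (x + ox, y + oy)) s) remaining

-- while remaining: ...  (fuel is a totality guard; each round removes at least the min cell)
def pvLoopA (fuel : Nat) (remaining : PySem.Set (Int × Int))
    (rectangles : List (List (String × Int))) : List (List (String × Int)) :=
  match fuel with
  | 0 => rectangles
  | f + 1 =>
    if remaining = [] then rectangles
    else
      match PySem.List.min2? remaining (fun item => item.2) (fun item => item.1) with
      | none => rectangles  -- unreachable: remaining is nonempty
      | some (start_x, start_y) =>
        let width_cells := pvWidthA (remaining.length + 1) remaining start_x start_y 1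
        let height_cells := pvHeightA (remaining.length + 1) remaining start_x start_y width_cells 1
        let remaining' := pvCarveA remaining start_x start_y width_cells height_cells
        pvLoopA f remaining'
          (rectangles ++ [[("x", start_x), ("y", start_y),
                           ("width_cells", width_cells), ("height_cells", height_cells)]])

def merge_cells_to_rectangles_py (solid_cells : List (Int × Int)) : List (List (String × Int)) :=
  let remaining := PySem.Set.ofList solid_cells
  pvLoopA (remaining.length + 1) remaining []

-- ===== PORT B =====
-- covered(px, py): any(bx <= px < bx+bw and by <= py < by+bh for (bx,by,bw,bh) in boxes)
def pvCoveredBy (boxes : List (Int × Int × Int × Int)) (px py : Int) : Bool :=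
  boxes.any (fun b =>
    decide (b.1 ≤ px ∧ px < b.1 + b.2.2.1 ∧ b.2.1 ≤ py ∧ py < b.2.1 + b.2.2.2))

-- while j < n and order[j] == (x + w, y) and not covered(x + w, y): w += 1; j += 1
-- (returns the width and the rest of the sorted list after the consumed run)
def pvRunB (boxes : List (Int × Int × Int × Int)) (x y : Int) (w : Int)
    (rest : List (Int × Int)) : Int × List (Int × Int) :=
  match rest with
  | [] => (w, [])
  | r :: rs =>
    if r = (x + w, y) ∧ pvCoveredBy boxes (x + w) y = false then
      pvRunB boxes x y (w + 1) rs
    else (w, r :: rs)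

-- while all((x+o, y+h) in cells and not covered(x+o, y+h) for o in range(w)): h += 1
-- (fuel is a totality guard only)
def pvHeightBB (fuel : Nat) (cells : PySem.Set (Int × Int))
    (boxes : List (Int × Int × Int × Int)) (x y w h : Int) : Int :=
  match fuel with
  | 0 => h
  | f + 1 =>
    if (PySem.List.pyRange 0 w).all
        (fun o => decide ((x + o, y + h) ∈ cells ∧ pvCoveredBy boxes (x + o) (y + h) = false)) then
      pvHeightBB f cells boxes x y w (h + 1)
    else h

-- cited by pvLoopBB's termination proof
lemma pvRunB_len (boxes : List (Int × Int × Int × Int)) (x y : Int) :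
    ∀ (rest : List (Int × Int)) (w : Int), (pvRunB boxes x y w rest).2.length ≤ rest.length := by
  intro rest
  induction rest with
  | nil => intro w; simp [pvRunB]
  | cons r rs ih =>
    intro w
    simp only [pvRunB]
    split
    · exact le_trans (ih (w + 1)) (by simp)
    · simp

-- while i < n: ... (pointer sweep over the sorted list; i = position of `order`'s suffix)
def pvLoopBB (order : List (Int × Int)) (cells : PySem.Set (Int × Int))
    (boxes : List (Int × Int × Int × Int)) : List (Int × Int × Int × Int) :=
  match order with
  | [] => boxes
  | cell :: rest =>
    if pvCoveredBy boxes cell.1 cell.2 then pvLoopBB rest cells boxes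
    else
      let wr := pvRunB boxes cell.1 cell.2 1 rest
      let h := pvHeightBB (cells.length + 1) cells boxes cell.1 cell.2 wr.1 1
      pvLoopBB wr.2 cells (boxes ++ [(cell.1, cell.2, wr.1, h)])
termination_by order.length
decreasing_by
  · simp
  · have := pvRunB_len boxes cell.1 cell.2 rest 1
    simp only [List.length_cons]
    omega

-- return [{"x": bx, "y": by, "width_cells": bw, "height_cells": bh} for ... in boxes]
def merge_cells_to_rectangles_py_alt (solid_cells : List (Int × Int)) : List (List (String × Int)) :=
  let cells := PySem.Set.ofList solid_cells
  (pvLoopBB (PySem.List.sorted2 cells (fun c => c.2) (fun c => c.1)) cells []).map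
    (fun b => [("x", b.1), ("y", b.2.1), ("width_cells", b.2.2.1), ("height_cells", b.2.2.2)])

-- ===== PRECONDITION & SPEC =====
def Spec_merge_cells_to_rectangles_py (solid_cells : List (Int × Int)) (out : List (List (String × Int))) : Prop := out = merge_cells_to_rectangles_py_alt solid_cells
instance (solid_cells : List (Int × Int)) (out : List (List (String × Int))) : Decidable (Spec_merge_cells_to_rectangles_py solid_cells out) := by unfold Spec_merge_cells_to_rectangles_py; infer_instance

-- ===== CLAIM (what is proved, stated in full; the proofs are below) =====
def Claim_equal_merge_cells_to_rectangles_py : Prop := ∀ (solid_cells : List (Int × Int)), Dom_merge_cells_to_rectangles_py solid_cells → Spec_merge_cells_to_rectangles_py solid_cells (merge_cells_to_rectangles_py solid_cells)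

-- ===== LEMMAS AND PROOFS =====

-- strict lexicographic (row, column) order — the order of B's sorted sweep
def pvKeyLT (a b : Int × Int) : Prop := a.2 < b.2 ∨ (a.2 = b.2 ∧ a.1 < b.1)

-- the dict a rectangle tuple is rendered to
def pvToDict (b : Int × Int × Int × Int) : List (String × Int) :=
  [("x", b.1), ("y", b.2.1), ("width_cells", b.2.2.1), ("height_cells", b.2.2.2)]

def pvInBox (x y w h : Int) (c : Int × Int) : Prop :=
  x ≤ c.1 ∧ c.1 < x + w ∧ y ≤ c.2 ∧ c.2 < y + h

lemma pv_ltb_iff (a b : Int × Int) :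
    (decide (a.2 < b.2) || (!decide (b.2 < a.2) && decide (a.1 < b.1))) = true ↔ pvKeyLT a b := by
  simp only [pvKeyLT, Bool.or_eq_true, Bool.and_eq_true, Bool.not_eq_true',
    decide_eq_true_eq, decide_eq_false_iff_not]
  omega

-- the folding step of min(..., key=lambda item: (item[1], item[0]))
def pvMinStep : Option (Int × Int) → Int × Int → Option (Int × Int)
  | none, x => some x
  | some mm, x => if (decide (x.2 < mm.2) || (!decide (mm.2 < x.2) && decide (x.1 < mm.1))) = true
                  then some x else some mm

lemma pvMinStep_none (x : Int × Int) : pvMinStep none x = some x := rfl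

lemma pvMinStep_some_pos {a x : Int × Int} (h : pvKeyLT x a) : pvMinStep (some a) x = some x := by
  simp only [pvMinStep]; rw [if_pos ((pv_ltb_iff x a).2 h)]

lemma pvMinStep_some_neg {a x : Int × Int} (h : ¬ pvKeyLT x a) : pvMinStep (some a) x = some a := by
  simp only [pvMinStep]
  rw [if_neg]
  intro hc; exact h ((pv_ltb_iff x a).1 hc)

lemma pv_min2_aux (m : Int × Int) :
    ∀ (l : List (Int × Int)) (acc : Option (Int × Int)),
    (∀ y ∈ l, y = m ∨ pvKeyLT m y) →
    (acc = some m ∨ (m ∈ l ∧ (acc = none ∨ ∃ a, pvKeyLT m a ∧ acc = some a))) →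
    List.foldl pvMinStep acc l = some m := by
  intro l
  induction l with
  | nil =>
    intro acc _ hinv
    rcases hinv with h | ⟨hm, _⟩
    · simpa using h
    · simp at hm
  | cons x t ih =>
    intro acc hall hinv
    simp only [List.foldl_cons]
    have hnotself : ∀ z : Int × Int, ¬ pvKeyLT z z := by simp [pvKeyLT]
    have hx := hall x (List.mem_cons_self)
    refine ih _ (fun y hy => hall y (List.mem_cons_of_mem _ hy)) ?_
    rcases hinv with rfl | ⟨hm, hacc⟩
    · rcases hx with hxm | hlt
      · subst hxm; left; rw [pvMinStep_some_neg (hnotself x)]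
      · left
        rw [pvMinStep_some_neg]
        intro hc
        simp only [pvKeyLT] at hc hlt; omega
    · have hmt : x ≠ m → m ∈ t := by
        intro hne
        rcases List.mem_cons.1 hm with h | h
        · exact absurd h.symm hne
        · exact h
      rcases hacc with rfl | ⟨a, hma, rfl⟩
      · rw [pvMinStep_none]
        rcases hx with hxm | hlt
        · subst hxm; left; rfl
        · right
          refine ⟨hmt ?_, Or.inr ⟨x, hlt, rfl⟩⟩
          rintro rfl; exact hnotself _ hlt
      · rcases hx with hxm | hlt
        · subst hxm; left; rw [pvMinStep_some_pos hma]
        · right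
          refine ⟨hmt ?_, Or.inr ?_⟩
          · rintro rfl; exact hnotself _ hlt
          · by_cases hb : pvKeyLT x a
            · rw [pvMinStep_some_pos hb]; exact ⟨x, hlt, rfl⟩
            · rw [pvMinStep_some_neg hb]; exact ⟨a, hma, rfl⟩

-- min(remaining, key=lambda item: (item[1], item[0])) is the unique pvKeyLT-least element
lemma pv_min2_spec (l : List (Int × Int)) (m : Int × Int) (hm : m ∈ l)
    (hall : ∀ y ∈ l, y = m ∨ pvKeyLT m y) :
    PySem.List.min2? l (fun c => c.2) (fun c => c.1) = some m := by
  have h := pv_min2_aux m l none hall (Or.inr ⟨hm, Or.inl rfl⟩)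
  unfold PySem.List.min2?
  convert h using 2
  funext acc x
  cases acc <;> rfl

-- strict countP decrease: the generic measure argument for the width/height loops
lemma pv_countP_lt (S : List (Int × Int)) (p q : (Int × Int) → Bool)
    (hpq : ∀ c, q c = true → p c = true) (a : Int × Int) (ha : a ∈ S)
    (hpa : p a = true) (hqa : q a = false) : S.countP q < S.countP p := by
  induction S with
  | nil => simp at ha
  | cons b t ih =>
    have hmono : t.countP q ≤ t.countP p := List.countP_mono_left (fun c _ hc => hpq c hc)
    rcases List.mem_cons.1 ha with rfl | hat
    · simp [hpa, hqa]
      omega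
    · have := ih hat
      simp only [List.countP_cons]
      by_cases hqb : q b = true
      · simp [hqb, hpq b hqb]; omega
      · simp only [Bool.not_eq_true] at hqb
        simp [hqb]
        split <;> omega

lemma pvWidthA_ge (f : Nat) (S : PySem.Set (Int × Int)) (x y w : Int) :
    w ≤ pvWidthA f S x y w := by
  induction f generalizing w with
  | zero => simp [pvWidthA]
  | succ f ih =>
    simp only [pvWidthA]
    split
    · exact le_trans (by omega) (ih (w + 1))
    · exact le_refl w

lemma pvHeightA_ge (f : Nat) (S : PySem.Set (Int × Int)) (x y w h : Int) :
    h ≤ pvHeightA f S x y w h := by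
  induction f generalizing h with
  | zero => simp [pvHeightA]
  | succ f ih =>
    simp only [pvHeightA]
    split
    · exact le_trans (by omega) (ih (h + 1))
    · exact le_refl h

lemma pv_coveredBy_append (boxes : List (Int × Int × Int × Int)) (b : Int × Int × Int × Int)
    (px py : Int) :
    pvCoveredBy (boxes ++ [b]) px py = false ↔
      pvCoveredBy boxes px py = false ∧ ¬ pvInBox b.1 b.2.1 b.2.2.1 b.2.2.2 (px, py) := by
  simp [pvCoveredBy, pvInBox]

-- A's width loop over the remaining set ≡ B's consumption of a run of consecutive
-- sorted entries, given that S = cells minus the emitted boxes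
lemma pvRun_eq (S cells : List (Int × Int)) (boxes : List (Int × Int × Int × Int)) (x y : Int)
    (hmem : ∀ c : Int × Int, c ∈ S ↔ c ∈ cells ∧ pvCoveredBy boxes c.1 c.2 = false) :
    ∀ (rest : List (Int × Int)) (w : Int) (f : Nat),
      (∀ c ∈ rest, c ∈ cells) →
      List.Pairwise pvKeyLT ((x + w - 1, y) :: rest) →
      (∀ c ∈ S, pvKeyLT (x + w - 1, y) c → c ∈ rest) →
      S.countP (fun c => decide (c.2 = y ∧ x + w ≤ c.1)) < f →
      (pvRunB boxes x y w rest).1 = pvWidthA f S x y w ∧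
      (pvRunB boxes x y w rest).2.Sublist rest ∧
      (∀ c ∈ S, pvKeyLT (x + pvWidthA f S x y w - 1, y) c → c ∈ (pvRunB boxes x y w rest).2) := by
  intro rest
  induction rest with
  | nil =>
    intro w f _ _ hinv hf
    have hnS : (x + w, y) ∉ S := by
      intro hS
      have := hinv _ hS (by simp [pvKeyLT])
      simp at this
    have hw : pvWidthA f S x y w = w := by
      match f with
      | 0 => exact absurd hf (Nat.not_lt_zero _)
      | f + 1 => simp only [pvWidthA]; rw [if_neg hnS]
    refine ⟨by simp [pvRunB, hw], by simp [pvRunB], ?_⟩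
    rw [hw]
    simpa [pvRunB] using hinv
  | cons r rs ih =>
    intro w f hcells hpair hinv hf
    match f with
    | 0 => exact absurd hf (Nat.not_lt_zero _)
    | f + 1 =>
      by_cases hS : (x + w, y) ∈ S
      · have hc := (hmem _).1 hS
        have hrr : r = (x + w, y) := by
          have hmemrest : (x + w, y) ∈ r :: rs :=
            hinv _ hS (by simp [pvKeyLT])
          rcases List.mem_cons.1 hmemrest with h | h
          · exact h.symm
          · exfalso
            have h1 : pvKeyLT (x + w - 1, y) r := List.rel_of_pairwise_cons hpair List.mem_cons_self
            have h2 : pvKeyLT r (x + w, y) := List.rel_of_pairwise_cons hpair.of_cons h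
            simp only [pvKeyLT] at h1 h2
            omega
        have hstepB : pvRunB boxes x y w (r :: rs) = pvRunB boxes x y (w + 1) rs := by
          simp only [pvRunB]
          rw [if_pos ⟨hrr, hc.2⟩]
        have hstepA : pvWidthA (f + 1) S x y w = pvWidthA f S x y (w + 1) := by
          simp only [pvWidthA]; rw [if_pos hS]
        have hshift : (x + (w + 1) - 1, y) = (x + w, y) := by
          simp only [Prod.mk.injEq]
          exact ⟨by ring, trivial⟩
        have hpair' : List.Pairwise pvKeyLT ((x + (w + 1) - 1, y) :: rs) := by
          rw [hshift, ← hrr]; exact hpair.of_cons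
        have hinv' : ∀ c ∈ S, pvKeyLT (x + (w + 1) - 1, y) c → c ∈ rs := by
          intro c hcS hlt
          rw [hshift] at hlt
          have hcr : c ∈ r :: rs := by
            apply hinv _ hcS
            simp only [pvKeyLT] at hlt ⊢
            omega
          rcases List.mem_cons.1 hcr with h | h
          · exfalso; rw [h, hrr] at hlt; simp [pvKeyLT] at hlt
          · exact h
        have hcnt : S.countP (fun c => decide (c.2 = y ∧ x + (w + 1) ≤ c.1)) < f := by
          have hdec := pv_countP_lt S (fun c => decide (c.2 = y ∧ x + w ≤ c.1))
            (fun c => decide (c.2 = y ∧ x + (w + 1) ≤ c.1))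
            (by intro c hq; simp only [decide_eq_true_eq] at *; omega)
            (x + w, y) hS (by simp) (by simp)
          omega
        obtain ⟨ha, hb, hc3⟩ := ih (w + 1) f (fun c hcm => hcells c (List.mem_cons_of_mem _ hcm))
          hpair' hinv' hcnt
        rw [hstepA, hstepB]
        exact ⟨ha, hb.cons r, hc3⟩
      · have hstepA : pvWidthA (f + 1) S x y w = w := by
          simp only [pvWidthA]; rw [if_neg hS]
        have hstepB : pvRunB boxes x y w (r :: rs) = (w, r :: rs) := by
          simp only [pvRunB]
          rw [if_neg]
          rintro ⟨hrr, hcov⟩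
          exact hS ((hmem (x + w, y)).2 ⟨hrr ▸ hcells r List.mem_cons_self, hcov⟩)
        rw [hstepA, hstepB]
        exact ⟨rfl, List.Sublist.refl _, hinv⟩

-- the two height loops agree whenever S = cells minus the emitted boxes (width ≥ 1)
lemma pvHeight_eq (S cells : List (Int × Int)) (boxes : List (Int × Int × Int × Int))
    (x y w : Int) (hw : 1 ≤ w)
    (hmem : ∀ c : Int × Int, c ∈ S ↔ c ∈ cells ∧ pvCoveredBy boxes c.1 c.2 = false) :
    ∀ (f g : Nat) (h : Int),
      S.countP (fun c => decide (c.1 = x ∧ y + h ≤ c.2)) < f →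
      S.countP (fun c => decide (c.1 = x ∧ y + h ≤ c.2)) < g →
      pvHeightA f S x y w h = pvHeightBB g cells boxes x y w h := by
  intro f
  induction f with
  | zero => intro g h hf _; exact absurd hf (Nat.not_lt_zero _)
  | succ f ih =>
    intro g h hf hg
    match g with
    | 0 => exact absurd hg (Nat.not_lt_zero _)
    | g + 1 =>
      simp only [pvHeightA, pvHeightBB]
      have hcongr : (PySem.List.pyRange 0 w).all (fun o => decide ((x + o, y + h) ∈ S)) =
          (PySem.List.pyRange 0 w).all
            (fun o => decide ((x + o, y + h) ∈ cells ∧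
              pvCoveredBy boxes (x + o) (y + h) = false)) := by
        rw [Bool.eq_iff_iff]
        simp only [List.all_eq_true, decide_eq_true_eq]
        constructor
        · intro hh o ho; exact (hmem _).1 (hh o ho)
        · intro hh o ho; exact (hmem _).2 (hh o ho)
      rw [← hcongr]
      by_cases hc : (PySem.List.pyRange 0 w).all (fun o => decide ((x + o, y + h) ∈ S)) = true
      · rw [if_pos hc, if_pos hc]
        have hmemS : (x, y + h) ∈ S := by
          have h0 : (0 : Int) ∈ PySem.List.pyRange 0 w := PySem.List.mem_pyRange_one.2 (by omega)
          have := (List.all_eq_true.1 hc) 0 h0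
          simpa using this
        have hdec := pv_countP_lt S (fun c => decide (c.1 = x ∧ y + h ≤ c.2))
          (fun c => decide (c.1 = x ∧ y + (h + 1) ≤ c.2))
          (by intro c hq; simp only [decide_eq_true_eq] at *; omega)
          (x, y + h) hmemS (by simp) (by simp)
        exact ih g (h + 1) (by omega) (by omega)
      · rw [if_neg hc, if_neg hc]

lemma pv_mem_foldl_discard (l : List Int) (x row : Int) (c : Int × Int) :
    ∀ s : PySem.Set (Int × Int),
    (c ∈ l.foldl (fun s ox => PySem.Set.discard s (x + ox, row)) s ↔
      c ∈ s ∧ ∀ ox ∈ l, c ≠ (x + ox, row)) := by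
  induction l with
  | nil => simp
  | cons o t ih =>
    intro s
    simp only [List.foldl_cons, ih, PySem.Set.mem_discard, List.mem_cons]
    constructor
    · rintro ⟨⟨hs, hne⟩, hall⟩
      exact ⟨hs, fun ox hox => by rcases hox with rfl | h; exact hne; exact hall ox h⟩
    · rintro ⟨hs, hall⟩
      exact ⟨⟨hs, hall o (Or.inl rfl)⟩, fun ox hox => hall ox (Or.inr hox)⟩

lemma pv_mem_carveA (S : PySem.Set (Int × Int)) (x y w h : Int) (c : Int × Int) :
    c ∈ pvCarveA S x y w h ↔ c ∈ S ∧ ¬ pvInBox x y w h c := by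
  unfold pvCarveA
  have main : ∀ (rows : List Int) (s : PySem.Set (Int × Int)),
      c ∈ rows.foldl (fun s oy => (PySem.List.pyRange 0 w).foldl
        (fun s ox => PySem.Set.discard s (x + ox, y + oy)) s) s ↔
      c ∈ s ∧ ∀ oy ∈ rows, ∀ ox ∈ PySem.List.pyRange 0 w, c ≠ (x + ox, y + oy) := by
    intro rows
    induction rows with
    | nil => simp
    | cons r t ih =>
      intro s
      simp only [List.foldl_cons, ih, pv_mem_foldl_discard, List.mem_cons]
      constructor
      · rintro ⟨⟨hs, hrow⟩, hall⟩
        refine ⟨hs, fun oy hoy => ?_⟩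
        rcases hoy with rfl | hoy
        · exact hrow
        · exact hall oy hoy
      · rintro ⟨hs, hall⟩
        exact ⟨⟨hs, hall r (Or.inl rfl)⟩, fun oy hoy => hall oy (Or.inr hoy)⟩
  rw [main]
  have hiff : (∀ oy ∈ PySem.List.pyRange 0 h, ∀ ox ∈ PySem.List.pyRange 0 w, c ≠ (x + ox, y + oy)) ↔
      ¬ pvInBox x y w h c := by
    simp only [PySem.List.mem_pyRange_one, pvInBox]
    constructor
    · rintro hall ⟨h1, h2, h3, h4⟩
      exact hall (c.2 - y) (by omega) (c.1 - x) (by omega) (by apply Prod.ext <;> simp)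
    · intro hbox oy hoy ox hox hc
      apply hbox
      rw [hc]
      simp
      omega
  rw [hiff]

lemma pv_nodup_carveA (S : PySem.Set (Int × Int)) (x y w h : Int) (hS : S.Nodup) :
    (pvCarveA S x y w h).Nodup := by
  unfold pvCarveA
  have inner : ∀ (l : List Int) (row : Int) (s : PySem.Set (Int × Int)), s.Nodup →
      (l.foldl (fun s ox => PySem.Set.discard s (x + ox, row)) s).Nodup := by
    intro l row
    induction l with
    | nil => intro s hs; exact hs
    | cons o t ih =>
      intro s hs
      exact ih _ (PySem.Set.nodup_discard _ _ hs)
  have outer : ∀ (rows : List Int) (s : PySem.Set (Int × Int)), s.Nodup →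
      (rows.foldl (fun s oy => (PySem.List.pyRange 0 w).foldl
        (fun s ox => PySem.Set.discard s (x + ox, y + oy)) s) s).Nodup := by
    intro rows
    induction rows with
    | nil => intro s hs; exact hs
    | cons r t ih => intro s hs; exact ih _ (inner _ _ _ hs)
  exact outer _ _ hS

lemma pv_length_lt (l' l : List (Int × Int)) (hnd' : l'.Nodup) (hnd : l.Nodup)
    (hsub : ∀ c ∈ l', c ∈ l) (a : Int × Int) (ha : a ∈ l) (ha' : a ∉ l') :
    l'.length < l.length := by
  rw [← List.toFinset_card_of_nodup hnd', ← List.toFinset_card_of_nodup hnd]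
  apply Finset.card_lt_card
  rw [Finset.ssubset_iff_of_subset]
  · exact ⟨a, by simpa using ha, by simpa using ha'⟩
  · intro c hc
    simp only [List.mem_toFinset] at *
    exact hsub c hc

lemma pv_foldl_insertBy_pairwise (key : Int × Int → Lex (Int × Int))
    (before : (Int × Int) → (Int × Int) → Bool)
    (hb : before = fun a b => decide (key a < key b)) :
    ∀ (l acc : List (Int × Int)), List.Pairwise (fun a b => key a ≤ key b) acc →
      List.Pairwise (fun a b => key a ≤ key b)
        (l.foldl (fun acc x => PySem.List.insertBy before x acc) acc) := by
  subst hb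
  intro l
  induction l with
  | nil => intro acc h; exact h
  | cons x t ih =>
    intro acc h
    simp only [List.foldl_cons]
    exact ih _ (PySem.List.insertBy_pairwise_le key x acc h)

-- sorted(cells, key=lambda c: (c[1], c[0])) is strictly pvKeyLT-sorted when cells has no duplicates
lemma pv_sorted2_pairwise (l : List (Int × Int)) (hnd : l.Nodup) :
    List.Pairwise pvKeyLT (PySem.List.sorted2 l (fun c => c.2) (fun c => c.1)) := by
  have hle : List.Pairwise
      (fun a b : Int × Int => (toLex (a.2, a.1) : Lex (Int × Int)) ≤ toLex (b.2, b.1))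
      (PySem.List.sorted2 l (fun c => c.2) (fun c => c.1)) := by
    unfold PySem.List.sorted2
    apply pv_foldl_insertBy_pairwise (fun c => toLex (c.2, c.1))
    · funext a b
      rw [Bool.eq_iff_iff]
      simp only [decide_eq_true_eq, Prod.Lex.lt_iff]
      simp
      omega
    · exact List.Pairwise.nil
  have hnd2 : (PySem.List.sorted2 l (fun c => c.2) (fun c => c.1)).Nodup :=
    ((PySem.List.sorted2_perm l _ _ false).nodup_iff).2 hnd
  have hand := hle.and hnd2
  apply hand.imp
  rintro a b ⟨hab, hne⟩
  rcases lt_or_eq_of_le hab with hlt | heq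
  · rw [Prod.Lex.lt_iff] at hlt
    simp only [pvKeyLT]
    simpa using hlt
  · exfalso
    apply hne
    have := toLex.injective heq
    exact Prod.ext (congrArg Prod.snd this) (congrArg Prod.fst this)

-- the main simulation: A's while-loop over the shrinking set ≡ B's pointer sweep
-- of the sorted list with boxes-containment as the "already merged" test
lemma pv_main (cells : List (Int × Int)) :
    ∀ (n : Nat) (ord : List (Int × Int)) (S : List (Int × Int))
      (boxes : List (Int × Int × Int × Int)) (f : Nat),
      ord.length ≤ n →
      S.Nodup →
      (∀ c : Int × Int, c ∈ S ↔ c ∈ cells ∧ pvCoveredBy boxes c.1 c.2 = false) →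
      (∀ c ∈ S, c ∈ ord) →
      (∀ c ∈ ord, c ∈ cells) →
      List.Pairwise pvKeyLT ord →
      S.length < f →
      pvLoopA f S (boxes.map pvToDict) = (pvLoopBB ord cells boxes).map pvToDict := by
  intro n
  induction n with
  | zero =>
    intro ord S boxes f hlen hnd hmem hsub horder hpair hf
    have hord : ord = [] := List.eq_nil_of_length_eq_zero (by omega)
    subst hord
    have hS : S = [] := List.eq_nil_iff_forall_not_mem.2 (fun c hc => by simpa using hsub c hc)
    subst hS
    match f with
    | 0 => exact absurd hf (Nat.not_lt_zero _)
    | f + 1 => simp [pvLoopA, pvLoopBB]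
  | succ n ih =>
    intro ord S boxes f hlen hnd hmem hsub horder hpair hf
    match ord with
    | [] =>
      have hS : S = [] := List.eq_nil_iff_forall_not_mem.2 (fun c hc => by simpa using hsub c hc)
      subst hS
      match f with
      | 0 => exact absurd hf (Nat.not_lt_zero _)
      | f + 1 => simp [pvLoopA, pvLoopBB]
    | (cx, cy) :: rest =>
      have hrestn : rest.length ≤ n := by simp at hlen; omega
      cases hcov : pvCoveredBy boxes cx cy with
      | true =>
        have hstepB : pvLoopBB ((cx, cy) :: rest) cells boxes = pvLoopBB rest cells boxes := by
          rw [pvLoopBB]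
          simp [hcov]
        rw [hstepB]
        refine ih rest S boxes f hrestn hnd hmem ?_
          (fun c hc => horder c (List.mem_cons_of_mem _ hc)) hpair.of_cons hf
        intro c hc
        rcases List.mem_cons.1 (hsub c hc) with h | h
        · exfalso
          have := ((hmem c).1 hc).2
          rw [h] at this
          simp [hcov] at this
        · exact h
      | false =>
        have hcell_cells : (cx, cy) ∈ cells := horder _ List.mem_cons_self
        have hcellS : (cx, cy) ∈ S := (hmem _).2 ⟨hcell_cells, hcov⟩
        have hSne : S ≠ [] := fun h => by simp [h] at hcellS
        match f with
        | 0 => exact absurd hf (Nat.not_lt_zero _)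
        | f + 1 =>
          have hmin : PySem.List.min2? S (fun item => item.2) (fun item => item.1)
              = some (cx, cy) := by
            apply pv_min2_spec S (cx, cy) hcellS
            intro yy hyy
            rcases List.mem_cons.1 (hsub yy hyy) with h | h
            · exact Or.inl h
            · exact Or.inr (List.rel_of_pairwise_cons hpair h)
          have hSlecells : S.length ≤ cells.length :=
            (hnd.subperm (fun c hc => ((hmem c).1 hc).1)).length_le
          have hshift1 : (cx + 1 - 1, cy) = (cx, cy) := by
            apply Prod.ext <;> simp
          obtain ⟨hwrun, hsubl, hinvw⟩ :=
            pvRun_eq S cells boxes cx cy hmem rest 1 (S.length + 1)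
              (fun c hc => horder c (List.mem_cons_of_mem _ hc))
              (by rw [hshift1]; exact hpair)
              (by
                intro c hcS hlt
                rw [hshift1] at hlt
                rcases List.mem_cons.1 (hsub c hcS) with h | h
                · exfalso; rw [h] at hlt; simp [pvKeyLT] at hlt
                · exact h)
              (by have := List.countP_le_length (l := S)
                    (p := fun c => decide (c.2 = cy ∧ cx + 1 ≤ c.1)); omega)
          set w := pvWidthA (S.length + 1) S cx cy 1 with hw_def
          have hw1 : 1 ≤ w := pvWidthA_ge _ _ _ _ _
          have hheight : pvHeightA (S.length + 1) S cx cy w 1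
              = pvHeightBB (cells.length + 1) cells boxes cx cy w 1 :=
            pvHeight_eq S cells boxes cx cy w hw1 hmem _ _ 1
              (by have := List.countP_le_length (l := S)
                    (p := fun c => decide (c.1 = cx ∧ cy + 1 ≤ c.2)); omega)
              (by have := List.countP_le_length (l := S)
                    (p := fun c => decide (c.1 = cx ∧ cy + 1 ≤ c.2)); omega)
          set h := pvHeightA (S.length + 1) S cx cy w 1 with hh_def
          have hh1 : 1 ≤ h := pvHeightA_ge _ _ _ _ _ _
          set rest' := (pvRunB boxes cx cy 1 rest).2 with hrest'_def
          -- one step of A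
          have hstepA : pvLoopA (f + 1) S (boxes.map pvToDict)
              = pvLoopA f (pvCarveA S cx cy w h)
                  ((boxes ++ [(cx, cy, w, h)]).map pvToDict) := by
            simp only [pvLoopA]
            rw [if_neg hSne, hmin]
            dsimp only
            rw [← hw_def, ← hh_def]
            simp [pvToDict]
          -- one step of B
          have hstepB : pvLoopBB ((cx, cy) :: rest) cells boxes
              = pvLoopBB rest' cells (boxes ++ [(cx, cy, w, h)]) := by
            rw [pvLoopBB]
            simp only [hcov, Bool.false_eq_true, if_false]
            rw [hwrun, ← hheight, ← hrest'_def]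
          rw [hstepA, hstepB]
          have hbox_cell : pvInBox cx cy w h (cx, cy) := by
            simp only [pvInBox]
            refine ⟨by omega, by omega, by omega, by omega⟩
          have hnotS' : (cx, cy) ∉ pvCarveA S cx cy w h := by
            rw [pv_mem_carveA]
            rintro ⟨_, hni⟩
            exact hni hbox_cell
          have hnd' : (pvCarveA S cx cy w h).Nodup := pv_nodup_carveA S cx cy w h hnd
          have hlen' : (pvCarveA S cx cy w h).length < S.length :=
            pv_length_lt _ S hnd' hnd
              (fun c hc => ((pv_mem_carveA S cx cy w h c).1 hc).1) (cx, cy) hcellS hnotS'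
          refine ih rest' _ _ f (le_trans hsubl.length_le hrestn) hnd' ?_ ?_
            (fun c hc => horder c (List.mem_cons_of_mem _ (hsubl.subset hc)))
            (hpair.of_cons.sublist hsubl) (by omega)
          · intro c
            rw [pv_mem_carveA, pv_coveredBy_append, hmem c]
            constructor
            · rintro ⟨⟨h1, h2⟩, h3⟩
              exact ⟨h1, h2, by simpa using h3⟩
            · rintro ⟨h1, h2, h3⟩
              exact ⟨⟨h1, h2⟩, by simpa using h3⟩
          · intro c hc
            rw [pv_mem_carveA] at hc
            obtain ⟨hcS, hcnb⟩ := hc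
            apply hinvw c hcS
            rcases List.mem_cons.1 (hsub c hcS) with hceq | hcr
            · exfalso; exact hcnb (hceq ▸ hbox_cell)
            · have hgt : pvKeyLT (cx, cy) c := List.rel_of_pairwise_cons hpair hcr
              simp only [pvKeyLT] at hgt ⊢
              simp only [pvInBox, not_and, not_lt] at hcnb
              by_cases hy : c.2 = cy
              · right
                refine ⟨hy.symm, ?_⟩
                by_contra hle
                rw [not_lt] at hle
                rcases hgt with hg | ⟨_, hg⟩
                · omega
                · have := hcnb (by omega) (by omega) (by omega)
                  omega
              · left
                rcases hgt with hg | ⟨hg, _⟩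
                · omega
                · exact absurd hg.symm hy

-- ===== VERDICT (by name: the statement is the Claim_ definition above) =====
theorem merge_cells_to_rectangles_py_spec : Claim_equal_merge_cells_to_rectangles_py := by
  intro solid_cells _
  unfold Spec_merge_cells_to_rectangles_py
  unfold merge_cells_to_rectangles_py merge_cells_to_rectangles_py_alt
  have hnd : (PySem.Set.ofList solid_cells).Nodup := PySem.Set.nodup_ofList solid_cells
  have := pv_main (PySem.Set.ofList solid_cells)
    (PySem.List.sorted2 (PySem.Set.ofList solid_cells) (fun c => c.2) (fun c => c.1)).length
    (PySem.List.sorted2 (PySem.Set.ofList solid_cells) (fun c => c.2) (fun c => c.1))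
    (PySem.Set.ofList solid_cells) [] ((PySem.Set.ofList solid_cells).length + 1)
    (le_refl _) hnd
    (by intro c; simp [pvCoveredBy])
    (by
      intro c hc
      exact ((PySem.List.sorted2_perm (PySem.Set.ofList solid_cells)
        (fun c => c.2) (fun c => c.1) false).mem_iff).2 hc)
    (by
      intro c hc
      exact ((PySem.List.sorted2_perm (PySem.Set.ofList solid_cells)
        (fun c => c.2) (fun c => c.1) false).mem_iff).1 hc)
    (pv_sorted2_pairwise _ hnd)
    (by omega)
  simpa [pvToDict] using this
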